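-- pv_equiv track=rewrite | github.com/srisarya/nanopore-barcoding-ORC | scripts/checks_balances/primer_search_rc_position.py | find_primer_in_sequence
-- ===== SOURCE A (Python) =====
-- def reverse_complement(seq):
--     """
--     Generate reverse complement of a DNA sequence.
--     Handles standard IUPAC ambiguity codes.
--     """
--     complement = {
--         'A': 'T', 'T': 'A', 'G': 'C', 'C': 'G',
--         'R': 'Y', 'Y': 'R', 'S': 'S', 'W': 'W',
--         'K': 'M', 'M': 'K', 'B': 'V', 'V': 'B',
--         'D': 'H', 'H': 'D', 'N': 'N',
--         # Lowercase versions
--         'a': 't', 't': 'a', 'g': 'c', 'c': 'g',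
--         'r': 'y', 'y': 'r', 's': 's', 'w': 'w',
--         'k': 'm', 'm': 'k', 'b': 'v', 'v': 'b',
--         'd': 'h', 'h': 'd', 'n': 'n'
--     }
--     return ''.join(complement.get(base, base) for base in reversed(seq))
--
-- def find_primer_in_sequence(sequence, primer_seq):
--     """
--     Find positions where primer matches in the sequence using simple string search.
--     Returns list of (position, strand) tuples where position is 0-based.
--     strand is 'fwd' or 'rc' (reverse complement)
--
--     Note: This does exact matching. For IUPAC ambiguity codes, we rely on
--     seqkit grep to identify which reads contain the primer, then do simple
--     string matching here for position finding.
--     """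
--     positions = []
--     seq_upper = sequence.upper()
--     primer_upper = primer_seq.upper()
--
--     # Search forward strand
--     start = 0
--     while True:
--         pos = seq_upper.find(primer_upper, start)
--         if pos == -1:
--             break
--         positions.append((pos, 'fwd'))
--         start = pos + 1
--
--     # Search reverse complement
--     primer_rc = reverse_complement(primer_seq).upper()
--     start = 0
--     while True:
--         pos = seq_upper.find(primer_rc, start)
--         if pos == -1:
--             break
--         positions.append((pos, 'rc'))
--         start = pos + 1
--
--     return positions
-- ===== SOURCE B (Python) =====
-- def reverse_complement(seq):
--     complement = {
--         'A': 'T', 'T': 'A', 'G': 'C', 'C': 'G',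
--         'R': 'Y', 'Y': 'R', 'S': 'S', 'W': 'W',
--         'K': 'M', 'M': 'K', 'B': 'V', 'V': 'B',
--         'D': 'H', 'H': 'D', 'N': 'N',
--         'a': 't', 't': 'a', 'g': 'c', 'c': 'g',
--         'r': 'y', 'y': 'r', 's': 's', 'w': 'w',
--         'k': 'm', 'm': 'k', 'b': 'v', 'v': 'b',
--         'd': 'h', 'h': 'd', 'n': 'n'
--     }
--     return ''.join(complement.get(base, base) for base in reversed(seq))
--
-- def find_primer_in_sequence(sequence, primer_seq):
--     seq_upper = sequence.upper()
--     primer_upper = primer_seq.upper()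
--     primer_rc = reverse_complement(primer_seq).upper()
--     n, m = len(seq_upper), len(primer_upper)
--     fwd = [(i, 'fwd') for i in range(n - m + 1) if seq_upper[i:i + m] == primer_upper]
--     rc = [(i, 'rc') for i in range(n - m + 1) if seq_upper[i:i + m] == primer_rc]
--     return fwd + rc
-- ===== Notes on version B (the rewrite author's own statement) =====
-- stated objective: simpler
-- what changed: Replaced the two repeated str.find while-loops (restarting the search at pos+1) by two direct sliding-window comprehensions over all window positions, comparing each slice to the primer / its reverse complement.
import Mathlib
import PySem

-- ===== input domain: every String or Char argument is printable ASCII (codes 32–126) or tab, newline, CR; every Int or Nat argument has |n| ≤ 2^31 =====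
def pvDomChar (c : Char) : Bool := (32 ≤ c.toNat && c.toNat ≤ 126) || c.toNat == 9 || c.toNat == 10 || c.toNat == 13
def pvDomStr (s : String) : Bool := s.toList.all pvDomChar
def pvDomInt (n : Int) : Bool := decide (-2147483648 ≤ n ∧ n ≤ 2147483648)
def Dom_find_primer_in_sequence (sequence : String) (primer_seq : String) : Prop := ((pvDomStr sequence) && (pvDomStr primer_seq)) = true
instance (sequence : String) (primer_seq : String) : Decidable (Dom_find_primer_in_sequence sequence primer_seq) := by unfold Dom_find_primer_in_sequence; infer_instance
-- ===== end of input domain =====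

-- B replaces A's two repeated-str.find while-loops by two direct sliding-window scans (simpler, same cost).

-- ===== PORT A =====
-- shared helper: the complement dict literal of reverse_complement
def pvComplement : PySem.Dict Char Char := PySem.Dict.ofList
  [('A','T'),('T','A'),('G','C'),('C','G'),
   ('R','Y'),('Y','R'),('S','S'),('W','W'),
   ('K','M'),('M','K'),('B','V'),('V','B'),
   ('D','H'),('H','D'),('N','N'),
   ('a','t'),('t','a'),('g','c'),('c','g'),
   ('r','y'),('y','r'),('s','s'),('w','w'),
   ('k','m'),('m','k'),('b','v'),('v','b'),
   ('d','h'),('h','d'),('n','n')]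

-- ''.join(complement.get(base, base) for base in reversed(seq))
def reverse_complement (seq : String) : String :=
  String.ofList ((seq.toList.reverse).map (fun base => PySem.Dict.getD pvComplement base base))

-- termination fact for A's while-loop: a successful find lies in [start, len]
theorem pvFindFrom_bounds (s p : List Char) (k : Nat)
    (h : PySem.Chars.findFrom s p (k : Int) none ≠ -1) :
    (k : Int) ≤ PySem.Chars.findFrom s p (k : Int) none ∧
      (PySem.Chars.findFrom s p (k : Int) none).toNat ≤ s.length := by
  by_cases hk : k ≤ s.length
  · rw [PySem.Chars.findFrom_natCast s p k hk] at h ⊢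
    by_cases hf : PySem.Chars.find (s.drop k) p = -1
    · simp [hf] at h
    · simp only [if_neg hf]
      have h0 := PySem.Chars.neg_one_le_find (s.drop k) p
      have hle := PySem.Chars.find_le_length (s.drop k) p
      simp [List.length_drop] at hle
      constructor
      · omega
      · omega
  · exfalso
    apply h
    -- start past the end: findFrom is -1 by definition
    simp only [PySem.Chars.findFrom]
    have : (s.length : Int) < (k : Int) := by exact_mod_cast Nat.lt_of_not_le hk
    simp
    omega

-- A's while-loop: repeatedly find from `start`, collect (pos, tag), restart at pos+1
def pvLoopA (s p : List Char) (tag : String) (start : Nat) : List (Int × String) :=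
  let pos := PySem.Chars.findFrom s p (start : Int) none
  if h : pos = -1 then []
  else (pos, tag) :: pvLoopA s p tag (pos.toNat + 1)
termination_by s.length + 1 - start
decreasing_by
  have hb := pvFindFrom_bounds s p start h
  have : (start : Int) ≤ pos := hb.1
  have : start ≤ pos.toNat := by omega
  have := hb.2
  omega

def find_primer_in_sequence (sequence : String) (primer_seq : String) : List (Int × String) :=
  let seq_upper := PySem.Str.upper sequence
  let primer_upper := PySem.Str.upper primer_seq
  let fwd := pvLoopA seq_upper.toList primer_upper.toList "fwd" 0
  let primer_rc := PySem.Str.upper (reverse_complement primer_seq)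
  fwd ++ pvLoopA seq_upper.toList primer_rc.toList "rc" 0

-- ===== PORT B =====
-- [(i, tag) for i in range(n - m + 1) if s[i:i+m] == p]
def pvScan (s p : List Char) (m : Nat) (tag : String) : List (Int × String) :=
  ((PySem.List.pyRange 0 ((s.length : Int) - (m : Int) + 1) 1).filter
    (fun i => PySem.List.slice s (some i) (some (i + (m : Int))) == p)).map (fun i => (i, tag))

def find_primer_in_sequence_alt (sequence : String) (primer_seq : String) : List (Int × String) :=
  let s := (PySem.Str.upper sequence).toList
  let p := (PySem.Str.upper primer_seq).toList
  let prc := (PySem.Str.upper (reverse_complement primer_seq)).toList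
  pvScan s p p.length "fwd" ++ pvScan s prc p.length "rc"

-- ===== PRECONDITION & SPEC =====
def Spec_find_primer_in_sequence (sequence : String) (primer_seq : String) (out : List (Int × String)) : Prop := out = find_primer_in_sequence_alt sequence primer_seq
instance (sequence : String) (primer_seq : String) (out : List (Int × String)) : Decidable (Spec_find_primer_in_sequence sequence primer_seq out) := by unfold Spec_find_primer_in_sequence; infer_instance

-- ===== CLAIM (what is proved, stated in full; the proofs are below) =====
def Claim_equal_find_primer_in_sequence : Prop := ∀ (sequence : String) (primer_seq : String), Dom_find_primer_in_sequence sequence primer_seq → Spec_find_primer_in_sequence sequence primer_seq (find_primer_in_sequence sequence primer_seq)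

-- ===== LEMMAS AND PROOFS =====

-- the slice test of B is prefix-of-drop, for nonnegative window starts
theorem pvMatch_iff (s p : List Char) (i : Nat) :
    (PySem.List.slice s (some (i : Int)) (some ((i : Int) + (p.length : Int))) == p) = true
      ↔ p <+: s.drop i := by
  rw [PySem.List.slice_natCast_add]
  rw [beq_iff_eq, List.prefix_iff_eq_take]
  exact eq_comm

-- key invariant: A's find-loop from start k equals B's scan restricted to [k, n-m+1)
theorem pvLoop_eq_scan (s p : List Char) (tag : String) (k : Nat) :
    pvLoopA s p tag k =
      ((PySem.List.pyRange (k : Int) ((s.length : Int) - (p.length : Int) + 1) 1).filter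
        (fun i => PySem.List.slice s (some i) (some (i + (p.length : Int))) == p)).map
        (fun i => (i, tag)) := by
  induction k using pvLoopA.induct with
  | s => exact s
  | p => exact p
  | case1 k pos hpos =>
    have hpos' : PySem.Chars.findFrom s p (k : Int) none = -1 := hpos
    rw [pvLoopA]
    simp only [hpos', dite_true]
    by_cases hk : k ≤ s.length
    · have hne := (PySem.Chars.findFrom_natCast_eq_neg_one_iff s p k hk).mp hpos'
      symm
      rw [List.map_eq_nil_iff, List.filter_eq_nil_iff]
      intro i hi
      rw [PySem.List.mem_pyRange_one] at hi
      intro hmatch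
      have h0 : 0 ≤ i := le_trans (by positivity) hi.1
      have hi' : i = ((i.toNat : Nat) : Int) := (Int.toNat_of_nonneg h0).symm
      rw [hi'] at hmatch
      have hpre : p <+: s.drop i.toNat := (pvMatch_iff s p i.toNat).mp hmatch
      have hkj : k ≤ i.toNat := by omega
      have hdj : s.drop i.toNat = (s.drop k).drop (i.toNat - k) := by
        rw [List.drop_drop]; congr 1; omega
      rw [hdj] at hpre
      exact hne (hpre.isInfix.trans (List.drop_suffix _ _).isInfix)
    · rw [PySem.List.pyRange_one_eq_nil (by omega)]
      simp
  | case2 k pos hpos ih =>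
    have hb := pvFindFrom_bounds s p k hpos
    have hk : k ≤ s.length := by omega
    obtain ⟨hge, hprefix, hmin⟩ := PySem.Chars.findFrom_natCast_spec s p k hk hpos
    have hr0 : 0 ≤ PySem.Chars.findFrom s p (k : Int) none := le_trans (by positivity) hb.1
    have hpos_eq : PySem.Chars.findFrom s p (k : Int) none =
        (((PySem.Chars.findFrom s p (k : Int) none).toNat : Nat) : Int) :=
      (Int.toNat_of_nonneg hr0).symm
    have hlp := hprefix.length_le
    rw [List.length_drop] at hlp
    have hrm : ((PySem.Chars.findFrom s p (k : Int) none).toNat : Int)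
        ≤ (s.length : Int) - (p.length : Int) := by omega
    rw [pvLoopA, dif_neg hpos]
    rw [PySem.List.pyRange_one_append (k : Int)
        ((PySem.Chars.findFrom s p (k : Int) none).toNat : Int)
        ((s.length : Int) - (p.length : Int) + 1) (by omega) (by omega)]
    rw [PySem.List.pyRange_one_cons (show ((PySem.Chars.findFrom s p (k : Int) none).toNat : Int)
        < (s.length : Int) - (p.length : Int) + 1 by omega)]
    rw [List.filter_append, List.map_append]
    have hnil : ((PySem.List.pyRange (k : Int)
          ((PySem.Chars.findFrom s p (k : Int) none).toNat : Int) 1).filter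
        (fun i => PySem.List.slice s (some i) (some (i + (p.length : Int))) == p)) = [] := by
      rw [List.filter_eq_nil_iff]
      intro i hi
      rw [PySem.List.mem_pyRange_one] at hi
      intro hmatch
      have h0 : 0 ≤ i := le_trans (by positivity) hi.1
      have hi' : i = ((i.toNat : Nat) : Int) := (Int.toNat_of_nonneg h0).symm
      rw [hi'] at hmatch
      exact hmin i.toNat (by omega) (by omega) ((pvMatch_iff s p i.toNat).mp hmatch)
    rw [hnil]
    have htrue : (PySem.List.slice s
        (some ((PySem.Chars.findFrom s p (k : Int) none).toNat : Int))
        (some (((PySem.Chars.findFrom s p (k : Int) none).toNat : Int) + (p.length : Int))) == p)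
        = true := (pvMatch_iff s p _).mpr hprefix
    rw [List.filter_cons, if_pos htrue, List.map_nil, List.nil_append, List.map_cons]
    rw [ih]
    have harg : ((pos.toNat + 1 : Nat) : Int) = PySem.Chars.findFrom s p (k : Int) none + 1 := by
      have hp : pos = PySem.Chars.findFrom s p (k : Int) none := rfl
      push_cast
      omega
    rw [harg, ← hpos_eq]

-- lengths: upper and reverse_complement preserve string length
theorem pvLen_upper (x : String) : (PySem.Str.upper x).toList.length = x.toList.length := by
  simp [PySem.Str.toList_upper, PySem.Chars.upper]

theorem pvLen_rc (x : String) : (reverse_complement x).toList.length = x.toList.length := by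
  simp [reverse_complement]

theorem pvScan_eq_loop (s p : List Char) (tag : String) :
    pvScan s p p.length tag = pvLoopA s p tag 0 := by
  rw [pvLoop_eq_scan s p tag 0, pvScan]
  norm_num

theorem find_primer_in_sequence_spec : Claim_equal_find_primer_in_sequence := by
  intro sequence primer_seq _
  unfold Spec_find_primer_in_sequence find_primer_in_sequence find_primer_in_sequence_alt
  have hlen : ((PySem.Str.upper (reverse_complement primer_seq)).toList).length
      = ((PySem.Str.upper primer_seq).toList).length := by
    rw [pvLen_upper, pvLen_rc, ← pvLen_upper]
  simp only []
  rw [pvScan_eq_loop, ← hlen, pvScan_eq_loop]
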